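-- pv_equiv track=rewrite | github.com/rjwen2045458/UoE_ANLP | Backoff.py | preprocess_line
-- ===== SOURCE A (Python) =====
-- def preprocess_line(line):
--     line = line.lower();
--     line = list(line);
--     lenth = len(line);
--
--     # literate until all characters checked
--     i = 0;
--     while i < lenth:
--         chara = line[i];
--         if ('a' <= chara <= 'z') or (chara == '.') or (chara == ' '):
--             i += 1;
--         elif '0' <= chara <= '9':
--             line[i] = '0';
--             i += 1;
--         else:
--             line.pop(i);
--             lenth -= 1;
--
--     # only add one "#"
--     # try adding "#####" here and you will see the generated result filled with "\n"
--     line = '#' + ''.join(line) + '#';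
--     return line
-- ===== SOURCE B (Python) =====
-- def preprocess_line(line):
--     body = ''.join(
--         '0' if '0' <= c <= '9' else c
--         for c in line.lower()
--         if ('a' <= c <= 'z') or c == '.' or c == ' ' or ('0' <= c <= '9')
--     )
--     return '#' + body + '#'
-- ===== Notes on version B (the rewrite author's own statement) =====
-- stated objective: simpler
-- what changed: Replaced the in-place index-walking while loop (with pop and a tracked length) by a single filter-then-map comprehension over the lowercased string joined once.
import Mathlib
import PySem

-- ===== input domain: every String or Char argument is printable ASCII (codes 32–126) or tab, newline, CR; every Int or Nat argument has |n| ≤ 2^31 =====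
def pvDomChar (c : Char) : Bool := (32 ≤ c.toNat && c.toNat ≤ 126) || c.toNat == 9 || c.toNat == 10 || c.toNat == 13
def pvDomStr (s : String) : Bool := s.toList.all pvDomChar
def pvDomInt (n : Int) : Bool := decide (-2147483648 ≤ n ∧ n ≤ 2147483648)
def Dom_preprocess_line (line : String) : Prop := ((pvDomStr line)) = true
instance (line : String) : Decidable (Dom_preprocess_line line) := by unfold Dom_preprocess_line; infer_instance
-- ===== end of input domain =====

-- B replaces A's in-place index/pop while loop by a single filter-then-map pass (simpler, no mutation).

-- ===== PORT A =====
-- A's while loop: i walks the mutable character list, keeping a-z/'.'/' ', overwriting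
-- digits with '0', and popping any other character (the tracked length shrinks with it).
def pvLoopA (cs : List Char) (i : Nat) : List Char :=
  if h : i < cs.length then
    let chara := cs[i]
    if ('a' ≤ chara ∧ chara ≤ 'z') ∨ chara = '.' ∨ chara = ' ' then
      pvLoopA cs (i + 1)
    else if '0' ≤ chara ∧ chara ≤ '9' then
      pvLoopA (cs.set i '0') (i + 1)
    else
      pvLoopA (cs.eraseIdx i) i
  else cs
termination_by cs.length - i
decreasing_by
  · omega
  · simp [List.length_set]; omega
  · have := List.length_eraseIdx_of_lt h; omega

def preprocess_line (line : String) : String :=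
  String.ofList ('#' :: pvLoopA (PySem.Str.lower line).toList 0 ++ ['#'])

-- ===== PORT B =====
-- the comprehension's filter condition and its '0'-for-digit mapping
def pvKeep (c : Char) : Bool := ('a' ≤ c ∧ c ≤ 'z') ∨ c = '.' ∨ c = ' ' ∨ ('0' ≤ c ∧ c ≤ '9')
def pvDig (c : Char) : Char := if '0' ≤ c ∧ c ≤ '9' then '0' else c

def preprocess_line_alt (line : String) : String :=
  String.ofList ('#' :: (((PySem.Str.lower line).toList.filter pvKeep).map pvDig) ++ ['#'])

-- ===== PRECONDITION & SPEC =====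
def Spec_preprocess_line (line : String) (out : String) : Prop := out = preprocess_line_alt line
instance (line : String) (out : String) : Decidable (Spec_preprocess_line line out) := by unfold Spec_preprocess_line; infer_instance

-- ===== CLAIM (what is proved, stated in full; the proofs are below) =====
def Claim_equal_preprocess_line : Prop := ∀ (line : String), Dom_preprocess_line line → Spec_preprocess_line line (preprocess_line line)

-- ===== LEMMAS AND PROOFS =====

-- the transform B applies; the invariant says the loop applies it to the unvisited suffix
def pvT (cs : List Char) : List Char := (cs.filter pvKeep).map pvDig

lemma pvT_cons (c : Char) (cs : List Char) :
    pvT (c :: cs) = if pvKeep c then pvDig c :: pvT cs else pvT cs := by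
  simp [pvT, List.filter_cons]; split <;> simp

lemma pvLoopA_eq (cs : List Char) (i : Nat) :
    pvLoopA cs i = cs.take i ++ pvT (cs.drop i) := by
  fun_induction pvLoopA cs i with
  | case1 cs i h chara hkeep ih =>
    have hcc : chara = cs[i] := rfl
    rw [hcc] at hkeep
    have hk : pvKeep cs[i] = true := by
      simp only [pvKeep, Bool.decide_or, Bool.or_eq_true, decide_eq_true_eq]
      rcases hkeep with h1 | h2 | h3
      · exact Or.inl h1
      · exact Or.inr (Or.inl h2)
      · exact Or.inr (Or.inr (Or.inl h3))
    have hd : pvDig cs[i] = cs[i] := by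
      simp only [pvDig]; rw [if_neg]; rintro ⟨h1, h2⟩
      rcases hkeep with ⟨ha, _⟩ | h2' | h3'
      · exact absurd (le_trans ha h2) (by decide)
      · rw [h2'] at h1; exact absurd h1 (by decide)
      · rw [h3'] at h1; exact absurd h1 (by decide)
    have e0 : cs.take (i+1) = cs.take i ++ [cs[i]] := by
      rw [List.take_add_one, List.getElem?_eq_getElem h]; rfl
    rw [ih, e0, List.drop_eq_getElem_cons h, pvT_cons, hk, if_pos rfl, hd,
        List.append_assoc]
    rfl
  | case2 cs i h chara hkeep hdig ih =>
    have hcc : chara = cs[i] := rfl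
    rw [hcc] at hdig
    have h' : i < (cs.set i '0').length := by simpa using h
    have hk : pvKeep cs[i] = true := by
      simp only [pvKeep, Bool.decide_or, Bool.or_eq_true, decide_eq_true_eq]
      exact Or.inr (Or.inr (Or.inr hdig))
    have hd : pvDig cs[i] = '0' := by simp [pvDig, hdig]
    have hlen : (cs.take i).length = i := List.length_take_of_le (le_of_lt h)
    rw [ih, List.drop_eq_getElem_cons h, pvT_cons, hk, if_pos rfl, hd,
        List.take_add_one, List.getElem?_eq_getElem h', List.getElem_set_self h',
        List.take_set, List.drop_set]
    rw [if_pos (by omega), List.set_eq_of_length_le (by omega)]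
    simp
  | case3 cs i h chara hkeep hdig ih =>
    have hcc : chara = cs[i] := rfl
    rw [hcc] at hkeep hdig
    have hk : pvKeep cs[i] = false := by
      simp only [pvKeep, Bool.decide_or, Bool.or_eq_false_iff, decide_eq_false_iff_not]
      exact ⟨fun h1 => hkeep (Or.inl h1), fun h2 => hkeep (Or.inr (Or.inl h2)),
             fun h3 => hkeep (Or.inr (Or.inr h3)), hdig⟩
    have hlen : (cs.take i).length = i := List.length_take_of_le (le_of_lt h)
    have e1 : (cs.take i ++ cs.drop (i+1)).take i = cs.take i := by
      rw [List.take_append_of_le_length (Nat.le_of_eq hlen.symm), List.take_take]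
      simp
    have e2 : (cs.take i ++ cs.drop (i+1)).drop i = cs.drop (i+1) := by
      rw [List.drop_append_of_le_length (Nat.le_of_eq hlen.symm)]
      simp
    rw [ih, List.eraseIdx_eq_take_drop_succ, List.drop_eq_getElem_cons h, pvT_cons,
        hk, if_neg (by simp), e1, e2]
  | case4 cs i h =>
    simp [List.take_of_length_le (Nat.le_of_not_lt h),
          List.drop_of_length_le (Nat.le_of_not_lt h), pvT]

-- ===== VERDICT (by name: the statement is the Claim_ definition above) =====
theorem preprocess_line_spec : Claim_equal_preprocess_line := by
  intro line _
  unfold Spec_preprocess_line preprocess_line preprocess_line_alt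
  rw [pvLoopA_eq]
  simp [pvT]
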